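-- pv_equiv track=rewrite | github.com/ows-ali/Hacktoberfest | Codechef/CPAIRS.py | countEO
-- ===== SOURCE A (Python) =====
-- def countEO(n_a, size):
--     even = []
--     c = 0
--     for itr in range(size):
--         if n_a[itr]%2 is 0 :
--             even.append(itr)
--     for k in range(len(even)):
--         c += size - (even[k] + 1) - (len(even) - k -1)
--     return c
-- ===== SOURCE B (Python) =====
-- def countEO(n_a, size):
--     evens_seen = 0
--     c = 0
--     for i in range(size):
--         if n_a[i] % 2 == 0:
--             evens_seen += 1
--         else:
--             c += evens_seen
--     return c
-- ===== Notes on version B (the rewrite author's own statement) =====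
-- stated objective: faster
-- what changed: Replaces A's two-phase scheme (collect the even indices into a list, then a second loop computing each even's count of later odds by a closed-form subtraction) with a single pass that keeps a running count of evens seen and adds it for every odd element, building no intermediate list.
import Mathlib
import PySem

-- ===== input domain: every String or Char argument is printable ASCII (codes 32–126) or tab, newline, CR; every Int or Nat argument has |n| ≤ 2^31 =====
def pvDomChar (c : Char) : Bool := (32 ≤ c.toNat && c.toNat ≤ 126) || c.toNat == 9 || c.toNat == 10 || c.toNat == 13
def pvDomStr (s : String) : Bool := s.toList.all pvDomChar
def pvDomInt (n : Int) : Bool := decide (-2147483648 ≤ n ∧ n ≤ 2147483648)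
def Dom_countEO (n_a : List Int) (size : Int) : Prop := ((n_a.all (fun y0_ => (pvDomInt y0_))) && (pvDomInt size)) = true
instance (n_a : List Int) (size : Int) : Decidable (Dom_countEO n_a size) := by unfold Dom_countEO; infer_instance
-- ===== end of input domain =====

-- B replaces A's two-phase scheme (collect even indices, then per-even closed-form subtraction)
-- with a single running-count pass; objective: faster (constant factor, no intermediate list).


-- ===== PORT A =====
-- Python's 'n_a[itr] % 2 is 0' compares with the cached small int 0, i.e. it is '% 2 == 0'.
-- n_a[itr] is ported with pyGetD; the out-of-range case (size > len(n_a)) is excluded by Pre_.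
def countEO (n_a : List Int) (size : Int) : Int :=
  let even : List Int :=
    (PySem.List.pyRange 0 size 1).foldl
      (fun ev itr => if PySem.Int.mod (PySem.List.pyGetD n_a itr 0) 2 == 0 then ev ++ [itr] else ev) []
  (PySem.List.pyRange 0 (even.length : Int) 1).foldl
    (fun c k => c + (size - (PySem.List.pyGetD even k 0 + 1) - ((even.length : Int) - k - 1))) 0

-- ===== PORT B =====
def countEO_alt (n_a : List Int) (size : Int) : Int :=
  ((PySem.List.pyRange 0 size 1).foldl
    (fun (st : Int × Int) i =>
      if PySem.Int.mod (PySem.List.pyGetD n_a i 0) 2 == 0 then (st.1 + 1, st.2)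
      else (st.1, st.2 + st.1))
    (0, 0)).2

-- ===== PRECONDITION & SPEC =====
-- Pre_ excludes exactly the inputs where the Python A raises IndexError (size > len(n_a)).
def Pre_countEO (n_a : List Int) (size : Int) : Prop := size ≤ (n_a.length : Int)
instance (n_a : List Int) (size : Int) : Decidable (Pre_countEO n_a size) := by unfold Pre_countEO; infer_instance
def pvWitness_countEO : List Int × Int := ([2, 3, 4, 5], 4)

def Spec_countEO (n_a : List Int) (size : Int) (out : Int) : Prop := out = countEO_alt n_a size
instance (n_a : List Int) (size : Int) (out : Int) : Decidable (Spec_countEO n_a size out) := by unfold Spec_countEO; infer_instance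

-- ===== CLAIM (what is proved, stated in full; the proofs are below) =====
def Claim_equal_countEO : Prop := ∀ (n_a : List Int) (size : Int), Dom_countEO n_a size → Pre_countEO n_a size → Spec_countEO n_a size (countEO n_a size)

-- ===== LEMMAS AND PROOFS =====

-- the even-index test both ports perform
def evFlag (n_a : List Int) (i : Int) : Bool := PySem.Int.mod (PySem.List.pyGetD n_a i 0) 2 == 0

-- A's first loop, in filter form
def evList (n_a : List Int) (size : Int) : List Int :=
  (PySem.List.pyRange 0 size 1).filter (evFlag n_a)

-- A's second loop, in sum form, over an arbitrary even-index list
def sSum (size : Int) (ev : List Int) : Int :=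
  ((PySem.List.pyRange 0 (ev.length : Int) 1).map
    (fun k => size - (PySem.List.pyGetD ev k 0 + 1) - ((ev.length : Int) - k - 1))).sum

lemma countEO_eq_sSum (n_a : List Int) (size : Int) :
    countEO n_a size = sSum size (evList n_a size) := by
  unfold countEO sSum evList evFlag
  rw [PySem.List.foldl_append_if_eq_filter]
  rw [PySem.List.foldl_add]
  simp

-- appending the just-seen even index contributes 0 odds after it: the sum is unchanged
lemma sSum_append_even (ev : List Int) (n : Int) :
    sSum (n + 1) (ev ++ [n]) = sSum n ev := by
  unfold sSum
  simp only [List.length_append, List.length_cons, List.length_nil]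
  push_cast
  rw [PySem.List.pyRange_one_succ_right (by positivity), List.map_append, List.sum_append]
  simp only [List.map_cons, List.map_nil, List.sum_cons, List.sum_nil]
  have hlast : PySem.List.pyGetD (ev ++ [n]) ((ev.length : Nat) : Int) 0 = n := by
    rw [PySem.List.pyGetD_natCast]; simp
  rw [hlast]
  have hterm : ∀ k ∈ PySem.List.pyRange 0 ((ev.length : Nat) : Int) 1,
      (n + 1 - (PySem.List.pyGetD (ev ++ [n]) k 0 + 1) - ((ev.length : Int) + 1 - k - 1))
      = (n - (PySem.List.pyGetD ev k 0 + 1) - ((ev.length : Int) - k - 1)) := by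
    intro k hk
    rw [PySem.List.mem_pyRange_one] at hk
    have hget : PySem.List.pyGetD (ev ++ [n]) k 0 = PySem.List.pyGetD ev k 0 := by
      rw [PySem.List.pyGetD_eq_getElem (ev ++ [n]) 0 hk.1 (by simp; omega),
          PySem.List.pyGetD_eq_getElem ev 0 hk.1 (by omega),
          List.getElem_append_left (by omega)]
    rw [hget]; ring
  rw [List.map_congr_left hterm]
  ring

-- an odd element at the end adds one odd after every even: the sum grows by len(even)
lemma sSum_succ (ev : List Int) (n : Int) :
    sSum (n + 1) ev = sSum n ev + (ev.length : Int) := by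
  unfold sSum
  have hterm : ∀ k ∈ PySem.List.pyRange 0 ((ev.length : Nat) : Int) 1,
      (n + 1 - (PySem.List.pyGetD ev k 0 + 1) - ((ev.length : Int) - k - 1))
      = (n - (PySem.List.pyGetD ev k 0 + 1) - ((ev.length : Int) - k - 1)) + 1 := by
    intro k _; ring
  rw [List.map_congr_left hterm, PySem.List.sum_map_add_int, PySem.List.sum_map_const_int]
  simp [PySem.List.length_pyRange_one]

-- the invariant of B's single pass: (evens seen so far, A-style sum so far)
lemma countB_pair (n_a : List Int) (n : Nat) :
    (PySem.List.pyRange 0 (n : Int) 1).foldl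
      (fun (st : Int × Int) i =>
        if PySem.Int.mod (PySem.List.pyGetD n_a i 0) 2 == 0 then (st.1 + 1, st.2)
        else (st.1, st.2 + st.1))
      (0, 0)
    = (((evList n_a n).length : Int), sSum (n : Int) (evList n_a (n : Int))) := by
  induction n with
  | zero => simp [PySem.List.pyRange_one_eq_nil, evList, sSum]
  | succ n ih =>
      have hsplit : PySem.List.pyRange 0 ((n + 1 : Nat) : Int) 1
          = PySem.List.pyRange 0 (n : Int) 1 ++ [(n : Int)] := by
        push_cast
        exact PySem.List.pyRange_one_succ_right (by positivity)
      have hEv : evList n_a ((n + 1 : Nat) : Int)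
          = evList n_a (n : Int) ++ (if evFlag n_a (n : Int) then [(n : Int)] else []) := by
        unfold evList
        rw [hsplit, List.filter_append]
        cases hf : evFlag n_a (n : Int) <;> simp [List.filter, hf]
      rw [hsplit, List.foldl_append, ih]
      simp only [List.foldl_cons, List.foldl_nil]
      set ev := evList n_a (n : Int) with hev
      by_cases hf : evFlag n_a (n : Int)
      · have hflag : (PySem.Int.mod (PySem.List.pyGetD n_a (n : Int) 0) 2 == 0) = true := hf
        rw [hflag]
        simp only [if_true]
        rw [hEv, if_pos hf]
        refine Prod.ext (by simp) ?_
        show sSum (n : Int) ev = sSum ((n + 1 : Nat) : Int) (ev ++ [(n : Int)])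
        push_cast
        rw [sSum_append_even]
      · have hflag : (PySem.Int.mod (PySem.List.pyGetD n_a (n : Int) 0) 2 == 0) = false := by
          simpa [evFlag] using hf
        rw [hflag]
        simp only [Bool.false_eq_true, if_false]
        rw [hEv, if_neg hf, List.append_nil]
        refine Prod.ext rfl ?_
        show sSum (n : Int) ev + (ev.length : Int) = sSum ((n + 1 : Nat) : Int) ev
        push_cast
        rw [sSum_succ]

-- ===== VERDICT (by name: the statement is the Claim_ definition above) =====
theorem countEO_spec : Claim_equal_countEO := by
  intro n_a size _hdom _hpre
  unfold Spec_countEO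
  by_cases h : 0 ≤ size
  · have hsz : size = ((size.toNat : Nat) : Int) := by omega
    rw [countEO_eq_sSum]
    unfold countEO_alt
    rw [hsz, countB_pair]
  · have hnil : PySem.List.pyRange 0 size 1 = [] :=
      PySem.List.pyRange_one_eq_nil (by omega)
    simp [countEO, countEO_alt, hnil, PySem.List.pyRange_one_eq_nil]
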